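-- pv_equiv track=rewrite | github.com/itsmesarath/signalbot | backend/openrouter_client.py | _extract_trading_insight
-- ===== SOURCE A (Python) =====
-- def _extract_trading_insight(ai_response: str) -> str:
--     """Extract main trading insight from AI response."""
--     # Look for conclusion or recommendation
--     lines = ai_response.split('\n')
--
--     for i, line in enumerate(lines):
--         if any(word in line.lower() for word in ['conclusion', 'recommendation', 'suggest', 'likely']):
--             # Return this line and the next if available
--             insight = line.strip()
--             if i + 1 < len(lines):
--                 insight += " " + lines[i + 1].strip()
--             return insight[:300]  # Limit length
--
--     # If no specific conclusion, return last non-empty line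
--     for line in reversed(lines):
--         if line.strip():
--             return line.strip()[:300]
--
--     return "No specific insight extracted"
-- ===== SOURCE B (Python) =====
-- def _extract_trading_insight(ai_response: str) -> str:
--     """Extract main trading insight: one fused forward pass instead of two scans."""
--     lines = ai_response.split('\n')
--     last_nonempty = None
--     for i, line in enumerate(lines):
--         low = line.lower()
--         if 'conclusion' in low or 'recommendation' in low or 'suggest' in low or 'likely' in low:
--             insight = line.strip()
--             if i + 1 < len(lines):
--                 insight += " " + lines[i + 1].strip()
--             return insight[:300]
--         stripped = line.strip()
--         if stripped:
--             last_nonempty = stripped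
--     if last_nonempty is not None:
--         return last_nonempty[:300]
--     return "No specific insight extracted"
-- ===== Notes on version B (the rewrite author's own statement) =====
-- stated objective: alternative
-- what changed: Fuses A's two sequential scans (forward keyword scan, then a separate reverse scan for the last non-empty line) into one forward pass that returns on the first keyword line while maintaining a last-nonempty accumulator.
import Mathlib
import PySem

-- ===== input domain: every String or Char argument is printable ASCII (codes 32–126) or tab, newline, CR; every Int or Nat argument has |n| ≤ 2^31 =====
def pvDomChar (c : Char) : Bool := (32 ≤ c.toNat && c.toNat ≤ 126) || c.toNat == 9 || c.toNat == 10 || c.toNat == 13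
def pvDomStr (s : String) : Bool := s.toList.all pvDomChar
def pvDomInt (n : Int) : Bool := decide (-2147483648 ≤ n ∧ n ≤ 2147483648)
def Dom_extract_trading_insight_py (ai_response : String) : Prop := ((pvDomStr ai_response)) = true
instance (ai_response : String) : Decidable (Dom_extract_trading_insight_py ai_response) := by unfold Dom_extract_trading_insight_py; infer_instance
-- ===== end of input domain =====

-- B fuses A's two sequential scans into a single forward pass with a last-nonempty accumulator (same cost, different decomposition).

-- ===== PORT A =====
-- any(word in line.lower() for word in [...])
def pvKwA (line : String) : Bool :=
  ["conclusion", "recommendation", "suggest", "likely"].any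
    (fun word => PySem.Str.isIn word (PySem.Str.lower line))

-- forward scan: first keyword line (rest = lines after it; i+1 < len ↔ rest ≠ [])
def pvScanA : List String → Option String
  | [] => none
  | line :: rest =>
    if pvKwA line then
      let insight := PySem.Str.strip line
      let insight := if rest.length > 0 then insight ++ " " ++ PySem.Str.strip (rest.headD "") else insight
      some (PySem.Str.slice insight none (some 300))
    else pvScanA rest

-- reverse scan: first non-empty stripped line of the reversed list
def pvRevA : List String → Option String
  | [] => none
  | line :: rest =>
    if PySem.Str.strip line == "" then pvRevA rest
    else some (PySem.Str.slice (PySem.Str.strip line) none (some 300))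

def extract_trading_insight_py (ai_response : String) : String :=
  let lines := (PySem.Str.split? ai_response "\n").getD []
  match pvScanA lines with
  | some r => r
  | none =>
    match pvRevA lines.reverse with
    | some r => r
    | none => "No specific insight extracted"

-- ===== PORT B =====
-- 'a in low or b in low or ...' as an explicit or-chain
def pvKwB (line : String) : Bool :=
  let low := PySem.Str.lower line
  PySem.Str.isIn "conclusion" low || PySem.Str.isIn "recommendation" low ||
  PySem.Str.isIn "suggest" low || PySem.Str.isIn "likely" low

-- single forward pass; `last` is the last_nonempty accumulator
def pvLoopB : List String → Option String → String
  | [], last =>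
    match last with
    | some s => PySem.Str.slice s none (some 300)
    | none => "No specific insight extracted"
  | line :: rest, last =>
    if pvKwB line then
      let insight := PySem.Str.strip line
      let insight := if rest.length > 0 then insight ++ " " ++ PySem.Str.strip (rest.headD "") else insight
      PySem.Str.slice insight none (some 300)
    else
      let stripped := PySem.Str.strip line
      pvLoopB rest (if stripped == "" then last else some stripped)

def extract_trading_insight_py_alt (ai_response : String) : String :=
  pvLoopB ((PySem.Str.split? ai_response "\n").getD []) none

-- ===== PRECONDITION & SPEC =====
def Spec_extract_trading_insight_py (ai_response : String) (out : String) : Prop := out = extract_trading_insight_py_alt ai_response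
instance (ai_response : String) (out : String) : Decidable (Spec_extract_trading_insight_py ai_response out) := by unfold Spec_extract_trading_insight_py; infer_instance

-- ===== CLAIM (what is proved, stated in full; the proofs are below) =====
def Claim_equal_extract_trading_insight_py : Prop := ∀ (ai_response : String), Dom_extract_trading_insight_py ai_response → Spec_extract_trading_insight_py ai_response (extract_trading_insight_py ai_response)

-- ===== LEMMAS AND PROOFS =====

theorem pvKw_eq (line : String) : pvKwA line = pvKwB line := by
  simp [pvKwA, pvKwB, List.any, Bool.or_assoc]

theorem pvRevA_append (xs : List String) (x : String) :
    pvRevA (xs ++ [x]) =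
      match pvRevA xs with
      | some r => some r
      | none => if PySem.Str.strip x == "" then none
                else some (PySem.Str.slice (PySem.Str.strip x) none (some 300)) := by
  induction xs with
  | nil => simp [pvRevA]
  | cons y ys ih =>
    by_cases h : PySem.Str.strip y == ""
    · simp [pvRevA, h, ih]
    · simp [pvRevA, h]

theorem pvLoopB_eq (lines : List String) (last : Option String) :
    pvLoopB lines last =
      match pvScanA lines with
      | some r => r
      | none =>
        match pvRevA lines.reverse with
        | some r => r
        | none =>
          match last with
          | some s => PySem.Str.slice s none (some 300)
          | none => "No specific insight extracted" := by
  induction lines generalizing last with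
  | nil => simp [pvLoopB, pvScanA, pvRevA]
  | cons line rest ih =>
    simp only [pvLoopB, pvScanA, pvKw_eq, List.reverse_cons, pvRevA_append]
    by_cases hk : pvKwB line
    · simp [hk]
    · simp only [hk, if_neg, Bool.false_eq_true, not_false_eq_true, ih]
      cases hs : pvScanA rest
      · cases hr : pvRevA rest.reverse
        · by_cases he : PySem.Str.strip line == ""
          · simp [he]
          · simp [he]
        · simp
      · simp

-- ===== VERDICT (by name: the statement is the Claim_ definition above) =====
theorem extract_trading_insight_py_spec : Claim_equal_extract_trading_insight_py := by
  intro s _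
  unfold Spec_extract_trading_insight_py extract_trading_insight_py extract_trading_insight_py_alt
  rw [pvLoopB_eq]
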